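-- pv_equiv track=rewrite | github.com/getbeton/openclaw-gtm-skills | plugins/beton-gtm/scripts/run_scrape.py | select_content_pages
-- ===== SOURCE A (Python) =====
-- MAX_CONTENT_PAGES = 10
--
-- HIGH_VALUE_PATTERNS = [
--     "/pricing", "/about", "/about-us", "/customers", "/case-studies",
--     "/success-stories", "/product", "/features", "/platform",
--     "/how-it-works", "/solutions", "/integrations",
-- ]
--
-- SKIP_PATTERNS = [
--     "/blog/", "/privacy", "/terms", "/gdpr", "/cookie",
--     "/login", "/signin", "/app/", "/dashboard/", "/press",
--     "/news/page",
--     # careers handled separately below — NOT in skip list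
-- ]
--
-- CAREER_SEGMENTS = {"careers", "jobs", "hiring", "join", "open-roles", "work-with-us",
--                    "join-us", "positions", "vacancies", "opportunities", "team"}
--
-- def is_career_url(url: str) -> bool:
--     path = url.lower().split("?")[0].rstrip("/")
--     segments = set(path.split("/"))
--     return bool(segments & CAREER_SEGMENTS)
--
-- def score_url(url: str) -> int:
--     path = url.lower().split("?")[0]
--     if is_career_url(url):
--         return -1  # skip in content pass; handled separately
--     for skip in SKIP_PATTERNS:
--         if skip in path:
--             return -1
--     for i, pattern in enumerate(HIGH_VALUE_PATTERNS):
--         if path.rstrip("/").endswith(pattern) or f"{pattern}/" in path: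
--             return len(HIGH_VALUE_PATTERNS) - i
--     return 0
--
-- def select_content_pages(sitemap_urls: list[str], domain: str) -> list[str]:
--     homepage = f"https://{domain}"
--     scored = [(score_url(u), u) for u in sitemap_urls]
--     scored.sort(key=lambda x: -x[0])
--     selected = [homepage]
--     seen = {homepage, homepage.rstrip("/")}
--     for s, url in scored:
--         if len(selected) >= MAX_CONTENT_PAGES:
--             break
--         if s < 0:
--             continue
--         norm = url.rstrip("/")
--         if norm not in seen and url not in seen:
--             selected.append(url)
--             seen.add(norm)
--     return selected
-- ===== SOURCE B (Python) =====
-- MAX_CONTENT_PAGES = 10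
--
-- HIGH_VALUE_PATTERNS = [
--     "/pricing", "/about", "/about-us", "/customers", "/case-studies",
--     "/success-stories", "/product", "/features", "/platform",
--     "/how-it-works", "/solutions", "/integrations",
-- ]
--
-- SKIP_PATTERNS = [
--     "/blog/", "/privacy", "/terms", "/gdpr", "/cookie",
--     "/login", "/signin", "/app/", "/dashboard/", "/press",
--     "/news/page",
-- ]
--
-- CAREER_SEGMENTS = {"careers", "jobs", "hiring", "join", "open-roles", "work-with-us",
--                    "join-us", "positions", "vacancies", "opportunities", "team"}
--
-- def is_career_url(url: str) -> bool:
--     path = url.lower().split("?")[0].rstrip("/")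
--     segments = set(path.split("/"))
--     return bool(segments & CAREER_SEGMENTS)
--
-- def score_url(url: str) -> int:
--     path = url.lower().split("?")[0]
--     if is_career_url(url):
--         return -1
--     for skip in SKIP_PATTERNS:
--         if skip in path:
--             return -1
--     for i, pattern in enumerate(HIGH_VALUE_PATTERNS):
--         if path.rstrip("/").endswith(pattern) or f"{pattern}/" in path:
--             return len(HIGH_VALUE_PATTERNS) - i
--     return 0
--
-- def select_content_pages(sitemap_urls: list[str], domain: str) -> list[str]:
--     # staged passes instead of a sort: one sweep of the input per score value 12..0
--     # (scores precomputed once); input order within each score is kept automatically.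
--     homepage = f"https://{domain}"
--     scores = [score_url(u) for u in sitemap_urls]
--     picked = []
--     seen = [homepage, homepage.rstrip("/")]
--     for want in range(12, -1, -1):
--         for u, s in zip(sitemap_urls, scores):
--             if s == want and len(picked) < MAX_CONTENT_PAGES - 1:
--                 norm = u.rstrip("/")
--                 if norm not in seen and u not in seen:
--                     picked.append(u)
--                     seen.append(norm)
--     return [homepage] + picked
-- ===== Notes on version B (the rewrite author's own statement) =====
-- stated objective: alternative
-- what changed: replaces the full stable sort of scored urls by 13 staged passes over the input, one per score value 12..0 (scores precomputed once), collecting picks into a plain list with a list-based seen structure instead of a set-keyed sorted selection loop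
import Mathlib
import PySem

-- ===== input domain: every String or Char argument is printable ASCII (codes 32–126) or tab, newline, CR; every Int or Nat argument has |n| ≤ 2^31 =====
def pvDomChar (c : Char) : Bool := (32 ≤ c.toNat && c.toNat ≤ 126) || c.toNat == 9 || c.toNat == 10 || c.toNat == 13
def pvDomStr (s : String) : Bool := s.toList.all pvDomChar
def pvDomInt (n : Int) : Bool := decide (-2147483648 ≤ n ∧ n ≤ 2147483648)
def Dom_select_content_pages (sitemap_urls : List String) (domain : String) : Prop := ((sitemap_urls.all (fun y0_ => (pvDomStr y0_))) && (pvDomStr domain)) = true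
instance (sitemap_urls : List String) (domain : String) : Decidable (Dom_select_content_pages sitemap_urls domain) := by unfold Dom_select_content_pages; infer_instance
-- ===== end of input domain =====

-- B replaces the stable sort of the scored urls by 13 staged passes over the input, one per
-- score value 12..0 with scores precomputed once, collecting picks into a plain list with a
-- list-based seen structure (objective: alternative algorithm; runtime is dominated by
-- per-url scoring and is comparable).

-- ===== PORT A =====
-- shared module-level helpers (identical source text in Source A and Source B)

def pvHighValuePatterns : List String :=
  ["/pricing", "/about", "/about-us", "/customers", "/case-studies",
   "/success-stories", "/product", "/features", "/platform",
   "/how-it-works", "/solutions", "/integrations"]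

def pvSkipPatterns : List String :=
  ["/blog/", "/privacy", "/terms", "/gdpr", "/cookie",
   "/login", "/signin", "/app/", "/dashboard/", "/press",
   "/news/page"]

def pvCareerSegments : PySem.Set String :=
  PySem.Set.ofList ["careers", "jobs", "hiring", "join", "open-roles", "work-with-us",
                    "join-us", "positions", "vacancies", "opportunities", "team"]

-- s.rstrip("/"): drop all trailing '/' characters (exact for this single-char strip set)
def pvRstripSlash (s : String) : String :=
  String.ofList ((s.toList.reverse.dropWhile (fun c => c == '/')).reverse)

-- url.lower().split("?")[0] (split with a non-empty separator is never empty, so headD is exact)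
def pvPathOf (url : String) : String :=
  String.ofList ((PySem.Chars.splitOn (PySem.Str.lower url).toList ['?']).headD [])

def is_career_url (url : String) : Bool :=
  let path := pvRstripSlash (pvPathOf url)
  let segments := PySem.Set.ofList ((PySem.Chars.splitOn path.toList ['/']).map String.ofList)
  -- bool(segments & CAREER_SEGMENTS): the intersection is non-empty
  !(PySem.Set.inter segments pvCareerSegments).isEmpty

def score_url (url : String) : Int :=
  let path := pvPathOf url
  if is_career_url url then -1
  else if pvSkipPatterns.any (fun skip => PySem.Str.isIn skip path) then -1
  else
    -- first i with a high-value match returns len(HIGH_VALUE_PATTERNS) - i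
    match pvHighValuePatterns.findIdx? (fun pattern =>
        PySem.Str.endswith (pvRstripSlash path) pattern ||
        PySem.Chars.isIn (pattern.toList ++ ['/']) path.toList) with
    | some i => (pvHighValuePatterns.length : Int) - (i : Int)
    | none => 0

def select_content_pages (sitemap_urls : List String) (domain : String) : List String :=
  let homepage := "https://" ++ domain
  let scored := sitemap_urls.map (fun u => (score_url u, u))
  let sortedScored := PySem.List.sorted scored (fun x => -x.1)
  let init : List String × PySem.Set String :=
    ([homepage], PySem.Set.ofList [homepage, pvRstripSlash homepage])
  let res := sortedScored.foldl (fun st p =>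
      if st.1.length ≥ 10 then st          -- break: once full the state never changes
      else if p.1 < 0 then st
      else
        let norm := pvRstripSlash p.2
        if !(PySem.Set.contains st.2 norm) && !(PySem.Set.contains st.2 p.2) then
          (st.1 ++ [p.2], PySem.Set.add st.2 norm)
        else st) init
  res.1

-- ===== PORT B =====

def select_content_pages_alt (sitemap_urls : List String) (domain : String) : List String :=
  let homepage := "https://" ++ domain
  let scores := sitemap_urls.map score_url
  -- for want in range(12, -1, -1): one pass over zip(sitemap_urls, scores) per score value
  let final := (PySem.List.pyRange 12 (-1) (-1)).foldl (fun acc want =>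
      (sitemap_urls.zip scores).foldl (fun acc p =>
        -- if s == want and len(picked) < MAX_CONTENT_PAGES - 1:
        if p.2 == want && decide (acc.1.length < 9) then
          let norm := pvRstripSlash p.1
          if !(acc.2.contains norm) && !(acc.2.contains p.1) then
            (acc.1 ++ [p.1], acc.2 ++ [norm])
          else acc
        else acc) acc)
    (([] : List String), [homepage, pvRstripSlash homepage])
  homepage :: final.1

-- ===== PRECONDITION & SPEC =====
def Spec_select_content_pages (sitemap_urls : List String) (domain : String) (out : List String) : Prop := out = select_content_pages_alt sitemap_urls domain
instance (sitemap_urls : List String) (domain : String) (out : List String) : Decidable (Spec_select_content_pages sitemap_urls domain out) := by unfold Spec_select_content_pages; infer_instance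

-- ===== CLAIM (what is proved, stated in full; the proofs are below) =====
def Claim_equal_select_content_pages : Prop := ∀ (sitemap_urls : List String) (domain : String), Dom_select_content_pages sitemap_urls domain → Spec_select_content_pages sitemap_urls domain (select_content_pages sitemap_urls domain)

-- ===== LEMMAS AND PROOFS =====

-- A's selection step once 0 ≤ score is known (Set-based seen, selected includes the homepage)
def pvStep (st : List String × PySem.Set String) (u : String) : List String × PySem.Set String :=
  if st.1.length ≥ 10 then st
  else
    let norm := pvRstripSlash u
    if !(PySem.Set.contains st.2 norm) && !(PySem.Set.contains st.2 u) then
      (st.1 ++ [u], PySem.Set.add st.2 norm)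
    else st

-- A's loop body on a scored pair
def pvStepA (st : List String × PySem.Set String) (p : Int × String) : List String × PySem.Set String :=
  if st.1.length ≥ 10 then st
  else if p.1 < 0 then st
  else
    let norm := pvRstripSlash p.2
    if !(PySem.Set.contains st.2 norm) && !(PySem.Set.contains st.2 p.2) then
      (st.1 ++ [p.2], PySem.Set.add st.2 norm)
    else st

-- B's selection step (list-based seen, picked excludes the homepage)
def pvStepB (st : List String × List String) (u : String) : List String × List String :=
  if st.1.length < 9 then
    let norm := pvRstripSlash u
    if !(st.2.contains norm) && !(st.2.contains u) then
      (st.1 ++ [u], st.2 ++ [norm])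
    else st
  else st

lemma score_url_range (u : String) : -1 ≤ score_url u ∧ score_url u ≤ 12 := by
  simp only [score_url]
  split_ifs with h1 h2
  · omega
  · omega
  · cases hfi : pvHighValuePatterns.findIdx? (fun pattern =>
        PySem.Str.endswith (pvRstripSlash (pvPathOf u)) pattern ||
        PySem.Chars.isIn (pattern.toList ++ ['/']) (pvPathOf u).toList) with
    | none => simp
    | some i =>
        have := List.findIdx?_eq_some_iff_findIdx_eq.mp hfi
        have hlen : pvHighValuePatterns.length = 12 := by decide
        simp only [hlen]
        omega

-- insertBy skips a block of elements it does not go before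
lemma insertBy_skip {α : Type} (before : α → α → Bool) (x : α) (as bs : List α)
    (ha : ∀ a ∈ as, before x a = false) :
    PySem.List.insertBy before x (as ++ bs) = as ++ PySem.List.insertBy before x bs := by
  induction as with
  | nil => simp
  | cons a as ih =>
      have hxa : before x a = false := ha a (by simp)
      simp only [List.cons_append, PySem.List.insertBy, hxa]
      simp only [Bool.false_eq_true, if_false]
      rw [ih (fun a ha' => ha a (by simp [ha']))]

lemma insertBy_middle {α : Type} (before : α → α → Bool) (x : α) (as bs : List α)
    (ha : ∀ a ∈ as, before x a = false) (hb : ∀ b ∈ bs, before x b = true) :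
    PySem.List.insertBy before x (as ++ bs) = as ++ x :: bs := by
  rw [insertBy_skip before x as bs ha]
  cases bs with
  | nil => simp [PySem.List.insertBy]
  | cons b bs => simp [PySem.List.insertBy, hb b (by simp)]

-- inserting into a concatenation of key-buckets appends at the end of x's own bucket
lemma insertBy_flatMap {α : Type} (key : α → Int) (ks : List Int) (x : α)
    (hks : ks.Pairwise (· < ·)) (hmem : key x ∈ ks) {f : Int → List α}
    (hf : ∀ k ∈ ks, ∀ y ∈ f k, key y = k) :
    PySem.List.insertBy (fun a b => decide (key a < key b)) x (ks.flatMap f)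
      = ks.flatMap (fun k => f k ++ if k = key x then [x] else []) := by
  induction ks with
  | nil => simp at hmem
  | cons k ks ih =>
      have hpair := (List.pairwise_cons.mp hks)
      by_cases hk : k = key x
      · -- insert at the end of bucket k; later buckets all have strictly larger keys
        have hrest : ∀ b ∈ ks.flatMap f, (decide (key x < key b)) = true := by
          intro b hbmem
          rcases List.mem_flatMap.mp hbmem with ⟨k', hk', hb⟩
          have : key b = k' := hf k' (by simp [hk']) b hb
          have : k < key b := by rw [this]; exact hpair.1 k' hk'
          simp [hk ▸ this]
        have hown : ∀ a ∈ f k, (decide (key x < key a)) = false := by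
          intro a hamem
          have : key a = k := hf k (by simp) a hamem
          simp [this, hk]
        rw [List.flatMap_cons, insertBy_middle _ x (f k) (ks.flatMap f) hown hrest]
        have hlater : ks.flatMap (fun k' => f k' ++ if k' = key x then [x] else [])
            = ks.flatMap f := by
          apply List.flatMap_congr
          intro k' hk'
          have : k < k' := hpair.1 k' hk'
          have : k' ≠ key x := by omega
          simp [this]
        simp [List.flatMap_cons, hk, hlater]
      · -- x's bucket is further right: skip bucket k entirely
        have hmem' : key x ∈ ks := by
          rcases List.mem_cons.mp hmem with h | h
          · exact absurd h.symm hk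
          · exact h
        have hkx : k < key x := hpair.1 _ hmem'
        simp only [List.flatMap_cons]
        rw [insertBy_skip _ x (f k) (ks.flatMap f)
              (by intro a ha
                  have : key a = k := hf k (by simp) a ha
                  simp [this]; omega)]
        rw [ih hks.of_cons hmem' (fun k' hk' => hf k' (by simp [hk']))]
        have : ¬ (k = key x) := hk
        simp [this]

-- stable sort = concatenation of the key-buckets, keys listed in strictly increasing order
lemma sorted_eq_flatMap_buckets {α : Type} (key : α → Int) (ks : List Int) (xs : List α)
    (hks : ks.Pairwise (· < ·)) (hx : ∀ x ∈ xs, key x ∈ ks) :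
    PySem.List.sorted xs key = ks.flatMap (fun k => xs.filter (fun x => key x == k)) := by
  induction xs using List.reverseRecOn with
  | nil => simp [PySem.List.sorted_eq_foldl_insertBy]
  | append_singleton xs x ih =>
      rw [PySem.List.sorted_eq_foldl_insertBy, List.foldl_append]
      simp only [List.foldl_cons, List.foldl_nil]
      rw [← PySem.List.sorted_eq_foldl_insertBy,
          ih (fun y hy => hx y (by simp [hy]))]
      rw [insertBy_flatMap key ks x hks (hx x (by simp))
            (fun k hk y hy => by
              have := List.of_mem_filter hy
              exact eq_of_beq this)]
      apply List.flatMap_congr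
      intro k hk
      rw [List.filter_append]
      simp only [List.filter_cons, List.filter_nil]
      by_cases h : key x = k
      · simp [h]
      · have : ¬ (k = key x) := fun hh => h hh.symm
        simp [h, this]

-- canonical forms of the two selection loops: sweep scores 12..0, folding the step over each bucket
def pvKsA : List Int := [-12,-11,-10,-9,-8,-7,-6,-5,-4,-3,-2,-1,0,1]
def pvKsA0 : List Int := [-12,-11,-10,-9,-8,-7,-6,-5,-4,-3,-2,-1,0]
def pvScores : List Int := [12,11,10,9,8,7,6,5,4,3,2,1,0]

def pvCanon (urls : List String) (init : List String × PySem.Set String) :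
    List String × PySem.Set String :=
  pvScores.foldl (fun st k => (urls.filter (fun u => score_url u == k)).foldl pvStep st) init

def pvCanonB (urls : List String) (init : List String × List String) :
    List String × List String :=
  pvScores.foldl (fun st k => (urls.filter (fun u => score_url u == k)).foldl pvStepB st) init

lemma stepA_eq_step (st : List String × PySem.Set String) (p : Int × String) (h : 0 ≤ p.1) :
    pvStepA st p = pvStep st p.2 := by
  simp [pvStepA, pvStep, show ¬ (p.1 < 0) by omega]

lemma bucketA_eq (urls : List String) (k : Int) :
    (urls.map (fun u => (score_url u, u))).filter (fun p => -p.1 == k)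
      = (urls.filter (fun u => score_url u == -k)).map (fun u => (score_url u, u)) := by
  rw [List.filter_map]
  apply congrArg
  apply List.filter_congr
  intro u _
  simp only [Function.comp_apply]
  rw [Bool.eq_iff_iff]
  simp only [beq_iff_eq]
  omega

lemma A_canon (urls : List String) (init : List String × PySem.Set String) :
    (PySem.List.sorted (urls.map (fun u => (score_url u, u))) (fun x => -x.1)).foldl pvStepA init
      = pvCanon urls init := by
  rw [sorted_eq_flatMap_buckets (fun x => -x.1) pvKsA (urls.map (fun u => (score_url u, u))) (by decide)
        (by intro p hp
            rcases List.mem_map.mp hp with ⟨u, _, rfl⟩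
            have := score_url_range u
            simp only [pvKsA, List.mem_cons, List.not_mem_nil, or_false]
            omega)]
  rw [List.foldl_flatMap]
  rw [show pvKsA = pvKsA0 ++ [1] from by decide, List.foldl_append]
  simp only [List.foldl_cons, List.foldl_nil]
  -- the score -1 bucket (key 1) leaves the state unchanged
  have hlast : ∀ st : List String × PySem.Set String,
      ((urls.map (fun u => (score_url u, u))).filter (fun p => -p.1 == (1:Int))).foldl pvStepA st
        = st := by
    intro st
    have h0 : ∀ (acc : List String × PySem.Set String) (p : Int × String),
        p ∈ (urls.map (fun u => (score_url u, u))).filter (fun p => -p.1 == (1:Int)) →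
        pvStepA acc p = acc := by
      intro acc p hp
      have h2 : -p.1 = 1 := eq_of_beq (List.mem_filter.mp hp).2
      simp [pvStepA, show p.1 < 0 by omega]
    rw [PySem.List.foldl_congr_mem _ _ (fun st _ => st) _ h0]
    exact PySem.List.foldl_ignore _ _
  rw [hlast]
  unfold pvCanon
  rw [show pvScores = pvKsA0.map (fun k => -k) from by decide, List.foldl_map]
  apply PySem.List.foldl_congr_mem
  intro st k hk
  have hk0 : k ≤ 0 := (by decide : ∀ k ∈ pvKsA0, k ≤ 0) k hk
  rw [bucketA_eq, List.foldl_map]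
  apply PySem.List.foldl_congr_mem
  intro acc u hu
  have h2 : score_url u = -k := eq_of_beq (List.mem_filter.mp hu).2
  exact stepA_eq_step acc (score_url u, u) (by simp only []; omega)

-- zip with the precomputed score list is the map pairing each url with its score
lemma zip_map_scores (urls : List String) :
    urls.zip (urls.map score_url) = urls.map (fun u => (u, score_url u)) := by
  induction urls with
  | nil => rfl
  | cons u urls ih => simp [ih]

-- B's port reduces to the canonical bucket sweep with the list-based step
set_option maxHeartbeats 1000000 in
lemma B_canon (urls : List String) (init : List String × List String) :
    (PySem.List.pyRange 12 (-1) (-1)).foldl (fun acc want =>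
        (urls.zip (urls.map score_url)).foldl (fun acc p =>
          if p.2 == want && decide (acc.1.length < 9) then
            let norm := pvRstripSlash p.1
            if !(acc.2.contains norm) && !(acc.2.contains p.1) then
              (acc.1 ++ [p.1], acc.2 ++ [norm])
            else acc
          else acc) acc) init
      = pvCanonB urls init := by
  rw [show PySem.List.pyRange 12 (-1) (-1) = pvScores from by decide, zip_map_scores]
  unfold pvCanonB
  apply PySem.List.foldl_congr_mem
  intro st k _
  rw [List.foldl_map]
  have hbody : ∀ (acc : List String × List String) (u : String),
      (if score_url u == k && decide (acc.1.length < 9) then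
         let norm := pvRstripSlash u
         if !(acc.2.contains norm) && !(acc.2.contains u) then
           (acc.1 ++ [u], acc.2 ++ [norm])
         else acc
       else acc)
        = (if score_url u == k then pvStepB acc u else acc) := by
    intro acc u
    by_cases hs : (score_url u == k) = true
    · by_cases hl : acc.1.length < 9
      · simp [hs, hl, pvStepB]
      · simp [hs, hl, pvStepB]
    · simp [Bool.eq_false_iff.mpr hs]
  rw [PySem.List.foldl_congr_mem _ _ _ _ (fun acc u _ => hbody acc u)]
  rw [PySem.List.foldl_ite_eq_foldl_filter]
  have hfil : (urls.filter (fun x => decide ((score_url x == k) = true)))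
      = urls.filter (fun u => score_url u == k) := by
    apply List.filter_congr
    intro u _
    exact Bool.decide_eq_true
  rw [hfil]

-- simulation relation between A's state and B's state
def pvRel (h : String) (stA : List String × PySem.Set String) (stB : List String × List String) : Prop :=
  stA.1 = h :: stB.1 ∧ ∀ x : String, PySem.Set.contains stA.2 x = stB.2.contains x

lemma step_rel (h : String) (stA : List String × PySem.Set String)
    (stB : List String × List String) (u : String) (hr : pvRel h stA stB) :
    pvRel h (pvStep stA u) (pvStepB stB u) := by
  obtain ⟨h1, h2⟩ := hr
  have hlen : stA.1.length = stB.1.length + 1 := by rw [h1]; simp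
  unfold pvStep pvStepB
  by_cases hfull : stB.1.length < 9
  · have hnf : ¬ (stA.1.length ≥ 10) := by omega
    simp only [hnf, if_false, hfull, if_true]
    rw [h2, h2]
    by_cases hc : (!(stB.2.contains (pvRstripSlash u)) && !(stB.2.contains u)) = true
    · simp only [hc, if_true]
      refine ⟨by simp [h1], ?_⟩
      intro x
      have hn : PySem.Set.contains stA.2 (pvRstripSlash u) = false := by
        rw [h2]
        have := (Bool.and_eq_true _ _ ▸ hc).1
        simpa using this
      simp only [PySem.Set.add, hn]
      simp only [Bool.false_eq_true, if_false]
      show List.contains (stA.2 ++ [pvRstripSlash u]) x = _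
      simp only [List.contains_append]
      exact congrArg (· || [pvRstripSlash u].contains x) (h2 x)
    · simp only [hc]
      exact ⟨h1, h2⟩
  · have hf : stA.1.length ≥ 10 := by omega
    simp only [hf, if_true, hfull, if_false]
    exact ⟨h1, h2⟩

lemma fold_rel (h : String) (us : List String) (stA : List String × PySem.Set String)
    (stB : List String × List String) (hr : pvRel h stA stB) :
    pvRel h (us.foldl pvStep stA) (us.foldl pvStepB stB) := by
  induction us generalizing stA stB with
  | nil => exact hr
  | cons u us ih => exact ih _ _ (step_rel h stA stB u hr)

lemma canon_rel (h : String) (urls : List String) (stA : List String × PySem.Set String)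
    (stB : List String × List String) (hr : pvRel h stA stB) :
    pvRel h (pvCanon urls stA) (pvCanonB urls stB) := by
  unfold pvCanon pvCanonB
  generalize pvScores = ks
  induction ks generalizing stA stB with
  | nil => exact hr
  | cons k ks ih => exact ih _ _ (fold_rel h _ stA stB hr)

-- the two initial states are related
lemma init_rel (h : String) :
    pvRel h ([h], PySem.Set.ofList [h, pvRstripSlash h]) ([], [h, pvRstripSlash h]) := by
  refine ⟨rfl, ?_⟩
  intro x
  by_cases he : pvRstripSlash h = h
  · simp [PySem.Set.ofList, PySem.Set.add, PySem.Set.contains, PySem.Set.empty, he]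
  · have hne : (h == pvRstripSlash h) = false := by
      simp only [beq_eq_false_iff_ne, ne_eq]
      exact fun hh => he hh.symm
    simp only [PySem.Set.ofList, PySem.Set.contains, PySem.Set.empty]
    simp [he]

-- ===== VERDICT (by name: the statement is the Claim_ definition above) =====
set_option maxHeartbeats 1000000 in
theorem select_content_pages_spec : Claim_equal_select_content_pages := by
  intro urls domain _
  show select_content_pages urls domain = select_content_pages_alt urls domain
  have hA : select_content_pages urls domain =
      ((PySem.List.sorted (urls.map (fun u => (score_url u, u))) (fun x => -x.1)).foldl pvStepA
        (["https://" ++ domain],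
         PySem.Set.ofList ["https://" ++ domain, pvRstripSlash ("https://" ++ domain)])).1 := rfl
  have hB : select_content_pages_alt urls domain =
      ("https://" ++ domain) ::
      ((PySem.List.pyRange 12 (-1) (-1)).foldl (fun acc want =>
          (urls.zip (urls.map score_url)).foldl (fun acc p =>
            if p.2 == want && decide (acc.1.length < 9) then
              let norm := pvRstripSlash p.1
              if !(acc.2.contains norm) && !(acc.2.contains p.1) then
                (acc.1 ++ [p.1], acc.2 ++ [norm])
              else acc
            else acc) acc)
        (([] : List String), ["https://" ++ domain, pvRstripSlash ("https://" ++ domain)])).1 := rfl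
  rw [hA, hB, A_canon, B_canon]
  exact (canon_rel ("https://" ++ domain) urls _ _ (init_rel _)).1
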